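-- pv_equiv track=rewrite | github.com/pelleservan/AES | src/cypher/key_extension.py | round_constant
-- ===== SOURCE A (Python) =====
-- def round_constant(w=[], round=0):
--     r = ['01', '02', '04', '08', '10', '20', '40', '80', '1B', '36']
--     R = [f'{r[round]}', '00', '00', '00']
--
--     r_bin = []
--     for i in  range(len(R)):
--         r_bin.append(bin(int(R[i], 16)).replace('0b', '').zfill(8))
--
--     word_bin = []
--     for i in range(len(w)):
--         word_bin.append(bin(int(w[i], 16)).replace('0b', '').zfill(8))
--
--     w = []
--     for i in range(len(word_bin)):
--         w.append('')
--         for j in range(len(word_bin[i])):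
--             w[i] += str((int(word_bin[i][j]) + int(r_bin[i][j]))%2)
--
--     for i in range(len(w)):
--         w[i] = hex(int(w[i], 2))[2:].zfill(2).upper()
--
--     return w
-- ===== SOURCE B (Python) =====
-- def round_constant(w=[], round=0):
--     r = ['01', '02', '04', '08', '10', '20', '40', '80', '1B', '36']
--     R = [r[round], '00', '00', '00']
--     return [format(int(x, 16) ^ int(c, 16), '02X') for x, c in zip(w, R)]
-- ===== Notes on version B (the rewrite author's own statement) =====
-- stated objective: idiomatic
-- what changed: B replaces A's four-pass binary-string machinery (bin()/zfill per byte, a nested per-bit mod-2 addition loop over character strings, then a hex()-reformat pass) with a single zip/map pass that XORs each word byte against the round-constant byte with the integer ^ operator and formats it with format(v,'02X').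
import Mathlib
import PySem

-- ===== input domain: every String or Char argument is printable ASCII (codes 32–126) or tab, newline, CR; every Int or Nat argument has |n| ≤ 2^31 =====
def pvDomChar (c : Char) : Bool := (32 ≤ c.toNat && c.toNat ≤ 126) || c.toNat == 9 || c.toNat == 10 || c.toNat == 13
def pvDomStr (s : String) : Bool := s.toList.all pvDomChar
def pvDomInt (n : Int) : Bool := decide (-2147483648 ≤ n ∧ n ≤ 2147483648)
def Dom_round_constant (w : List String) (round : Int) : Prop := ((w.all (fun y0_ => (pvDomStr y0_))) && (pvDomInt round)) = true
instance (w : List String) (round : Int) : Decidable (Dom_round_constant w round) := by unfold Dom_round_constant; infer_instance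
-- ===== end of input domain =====

-- B re-implements A's per-bit binary-string XOR machinery as a single zip/map with the
-- integer XOR operator; the theorems below prove the return values agree on Pre_.

-- ===== PORT A =====
-- hand port of hex(n) (PySem has no hex); exact for 0 ≤ n, the only case A reaches
def pvHexChars (n : Int) : List Char := '0' :: 'x' :: Nat.toDigits 16 n.toNat

-- bin(int(s,16)).replace('0b','').zfill(8), split into its value stage (string work on List Char)
def pvBinstrV (v : Int) : List Char :=
  PySem.Chars.zfill (PySem.Chars.replace (PySem.Int.toBinChars0b v) ['0', 'b'] []) 8
def pvBinstr (s : String) : List Char := pvBinstrV ((PySem.Int.ofStrBase? s 16).getD 0)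

-- A's inner loop: w[i] = ''; for j: w[i] += str((int(word_bin[i][j]) + int(r_bin[i][j])) % 2)
def pvXorBits (wb rb : List Char) : List Char :=
  (List.range wb.length).foldl (fun s (j : Nat) =>
    s ++ PySem.Int.toChars (PySem.Int.mod
      ((PySem.Int.ofChars? [(PySem.List.pyGet? wb (↑j : Int)).getD ' ']).getD 0 +
       (PySem.Int.ofChars? [(PySem.List.pyGet? rb (↑j : Int)).getD ' ']).getD 0) 2)) []

-- hex(int(s,2))[2:].zfill(2).upper()
def pvToHex2 (s : List Char) : List Char :=
  PySem.Chars.upper (PySem.Chars.zfill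
    (PySem.Chars.slice (pvHexChars ((PySem.Int.ofCharsBase? s 2).getD 0)) (some 2) none) 2)

-- A's body after r[round] succeeded ('.getD' defaults stand where Python would raise; Pre_ excludes those)
def pvBodyA (rc : String) (w : List String) : List String :=
  let R : List String := [rc, "00", "00", "00"]
  let r_bin : List (List Char) :=
    (List.range R.length).foldl (fun acc i => acc ++ [pvBinstr (R.getD i "")]) []
  let word_bin : List (List Char) :=
    (List.range w.length).foldl (fun acc i => acc ++ [pvBinstr (w.getD i "")]) []
  let w2 : List (List Char) :=
    (List.range word_bin.length).foldl
      (fun acc i => acc ++ [pvXorBits (word_bin.getD i []) (r_bin.getD i [])]) []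
  (List.range w2.length).foldl
    (fun acc i => acc ++ [String.ofList (pvToHex2 (w2.getD i []))]) []

def round_constant (w : List String) (round : Int) : List String :=
  let r : List String := ["01", "02", "04", "08", "10", "20", "40", "80", "1B", "36"]
  match PySem.List.pyGet? r round with
  | none => []          -- IndexError on r[round] (excluded by Pre_)
  | some rc => pvBodyA rc w

-- ===== PORT B =====
-- hand port of format(v,'02X') (PySem has no hex formatting); exact for 0 ≤ v, the only case B reaches
def pvFmt02X (v : Int) : List Char :=
  PySem.Chars.upper (PySem.Chars.zfill (Nat.toDigits 16 v.toNat) 2)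

def pvBodyB (rc : String) (w : List String) : List String :=
  (w.zip [rc, "00", "00", "00"]).map (fun p =>
    String.ofList (pvFmt02X (PySem.Int.bxor
      ((PySem.Int.ofStrBase? p.1 16).getD 0) ((PySem.Int.ofStrBase? p.2 16).getD 0))))

def round_constant_alt (w : List String) (round : Int) : List String :=
  let r : List String := ["01", "02", "04", "08", "10", "20", "40", "80", "1B", "36"]
  match PySem.List.pyGet? r round with
  | none => []          -- IndexError on r[round] (excluded by Pre_)
  | some rc => pvBodyB rc w

-- ===== PRECONDITION & SPEC =====
-- Pre_ excludes exactly the inputs where A raises: round outside [-10,9] (IndexError on r[round]),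
-- more than 4 words (IndexError on r_bin[i]), a word that is not a hex literal (ValueError),
-- a negative word (ValueError on the sign char in the bit loop) or one over 0xFF (its binary
-- string is longer than 8 bits, IndexError past the 8-char constant string).
def Pre_round_constant (w : List String) (round : Int) : Prop :=
  (-10 ≤ round ∧ round < 10) ∧ w.length ≤ 4 ∧
  (w.all (fun s => (PySem.Int.ofStrBase? s 16).elim false
    (fun v => decide (0 ≤ v ∧ v ≤ 255))) = true)
instance (w : List String) (round : Int) : Decidable (Pre_round_constant w round) := by
  unfold Pre_round_constant; infer_instance

def pvWitness_round_constant : List String × Int := (["AA", "1b", "05", "ff"], 9)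

def Spec_round_constant (w : List String) (round : Int) (out : List String) : Prop := out = round_constant_alt w round
instance (w : List String) (round : Int) (out : List String) : Decidable (Spec_round_constant w round out) := by unfold Spec_round_constant; infer_instance

-- ===== CLAIM (what is proved, stated in full; the proofs are below) =====
def Claim_equal_round_constant : Prop := ∀ (w : List String) (round : Int), Dom_round_constant w round → Pre_round_constant w round → Spec_round_constant w round (round_constant w round)

-- ===== LEMMAS AND PROOFS =====
-- the 8-bit binary string of n, most significant bit first
def pvBits8 (n : Nat) : List Char :=
  (List.range 8).map (fun j => if n.testBit (7 - j) then '1' else '0')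

set_option maxRecDepth 200000 in
theorem pv_binstr256 : ∀ n ∈ List.range 256, pvBinstrV (↑n) = pvBits8 n := by decide

set_option maxRecDepth 200000 in
theorem pv_parse256 : ∀ n ∈ List.range 256,
    PySem.Int.ofCharsBase? (pvBits8 n) 2 = some (↑n) := by decide

theorem pv_charXor : ∀ p q : Bool,
    PySem.Int.toChars (PySem.Int.mod
      ((PySem.Int.ofChars? [if p then '1' else '0']).getD 0 +
       (PySem.Int.ofChars? [if q then '1' else '0']).getD 0) 2)
    = [if xor p q then '1' else '0'] := by decide

theorem pv_bits8_get (n j : Nat) (hj : j < 8) :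
    PySem.List.pyGet? (pvBits8 n) (↑j) = some (if n.testBit (7 - j) then '1' else '0') := by
  rw [PySem.List.pyGet?_natCast]
  simp [pvBits8, hj]

theorem pv_xor_bits (a b : Nat) :
    pvXorBits (pvBits8 a) (pvBits8 b) = pvBits8 (a ^^^ b) := by
  have hpos : ∀ j : Nat, j < 8 →
      PySem.Int.toChars (PySem.Int.mod
        ((PySem.Int.ofChars? [(PySem.List.pyGet? (pvBits8 a) (↑j : Int)).getD ' ']).getD 0 +
         (PySem.Int.ofChars? [(PySem.List.pyGet? (pvBits8 b) (↑j : Int)).getD ' ']).getD 0) 2)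
      = [if (a ^^^ b).testBit (7 - j) then '1' else '0'] := by
    intro j hj
    rw [pv_bits8_get a j hj, pv_bits8_get b j hj]
    simp only [Option.getD_some]
    rw [pv_charXor]
    simp [Nat.testBit_xor]
  have hlen : (pvBits8 a).length = 8 := by simp [pvBits8]
  unfold pvXorBits
  rw [hlen, PySem.List.foldl_append_eq_flatMap, List.nil_append,
    show List.range 8 = [0, 1, 2, 3, 4, 5, 6, 7] from rfl]
  simp only [List.flatMap_cons, List.flatMap_nil, List.append_nil]
  rw [hpos 0 (by norm_num), hpos 1 (by norm_num), hpos 2 (by norm_num), hpos 3 (by norm_num),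
    hpos 4 (by norm_num), hpos 5 (by norm_num), hpos 6 (by norm_num), hpos 7 (by norm_num)]
  simp [pvBits8, List.range_succ]
  split_ifs <;> first | rfl | omega

theorem pv_tohex (n : Nat) (h : n < 256) : pvToHex2 (pvBits8 n) = pvFmt02X (↑n) := by
  have hp := pv_parse256 n (by simpa using h)
  simp [pvToHex2, hp, pvHexChars, pvFmt02X, PySem.Chars.slice_eq_listSlice,
    PySem.List.slice_from]

theorem pv_elem (s cs : String) (v m : Int)
    (hs : PySem.Int.ofStrBase? s 16 = some v) (h0 : 0 ≤ v) (h1 : v ≤ 255)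
    (hm : PySem.Int.ofStrBase? cs 16 = some m) (hm0 : 0 ≤ m) (hm1 : m ≤ 255) :
    pvToHex2 (pvXorBits (pvBinstr s) (pvBinstr cs)) = pvFmt02X (PySem.Int.bxor v m) := by
  obtain ⟨n, rfl⟩ : ∃ n : Nat, (↑n : Int) = v := ⟨v.toNat, Int.toNat_of_nonneg h0⟩
  obtain ⟨k, rfl⟩ : ∃ k : Nat, (↑k : Int) = m := ⟨m.toNat, Int.toNat_of_nonneg hm0⟩
  have hn : n < 256 := by exact_mod_cast Int.lt_add_one_iff.mpr h1
  have hk : k < 256 := by exact_mod_cast Int.lt_add_one_iff.mpr hm1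
  rw [pvBinstr, pvBinstr, hs, hm, Option.getD_some, Option.getD_some,
    pv_binstr256 n (by simpa using hn), pv_binstr256 k (by simpa using hk),
    pv_xor_bits, pv_tohex _ (by exact Nat.xor_lt_two_pow (n := 8) hn hk),
    PySem.Int.bxor_natCast]

theorem pv_body (rc : String) (mi : Int) (w : List String)
    (hm : PySem.Int.ofStrBase? rc 16 = some mi) (hm0 : 0 ≤ mi) (hm1 : mi ≤ 255)
    (hlen : w.length ≤ 4)
    (hw : w.all (fun s => (PySem.Int.ofStrBase? s 16).elim false
      (fun v => decide (0 ≤ v ∧ v ≤ 255))) = true) :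
    pvBodyA rc w = pvBodyB rc w := by
  have h00 : PySem.Int.ofStrBase? "00" 16 = some 0 := by decide
  have get : ∀ s ∈ w, ∃ v, PySem.Int.ofStrBase? s 16 = some v ∧ 0 ≤ v ∧ v ≤ 255 := by
    intro s hs
    have := (List.all_eq_true.mp hw) s hs
    cases hv : PySem.Int.ofStrBase? s 16 with
    | none => rw [hv] at this; simp [Option.elim] at this
    | some v => refine ⟨v, rfl, ?_⟩; rw [hv] at this; simpa using this
  rcases w with _|⟨a, _|⟨b, _|⟨c, _|⟨d, _|⟨e, rest⟩⟩⟩⟩⟩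
  · simp [pvBodyA, pvBodyB]
  · -- [a]
    obtain ⟨va, ha, ha0, ha1⟩ := get a (by simp)
    simp [pvBodyA, pvBodyB, List.range_succ, ha, hm,
      pv_elem a rc va mi ha ha0 ha1 hm hm0 hm1]
  · -- [a, b]
    obtain ⟨va, ha, ha0, ha1⟩ := get a (by simp)
    obtain ⟨vb, hb, hb0, hb1⟩ := get b (by simp)
    simp [pvBodyA, pvBodyB, List.range_succ, ha, hb, hm, h00,
      pv_elem a rc va mi ha ha0 ha1 hm hm0 hm1,
      pv_elem b "00" vb 0 hb hb0 hb1 h00 (by norm_num) (by norm_num)]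
  · -- [a, b, c]
    obtain ⟨va, ha, ha0, ha1⟩ := get a (by simp)
    obtain ⟨vb, hb, hb0, hb1⟩ := get b (by simp)
    obtain ⟨vc, hc, hc0, hc1⟩ := get c (by simp)
    simp [pvBodyA, pvBodyB, List.range_succ, ha, hb, hc, hm, h00,
      pv_elem a rc va mi ha ha0 ha1 hm hm0 hm1,
      pv_elem b "00" vb 0 hb hb0 hb1 h00 (by norm_num) (by norm_num),
      pv_elem c "00" vc 0 hc hc0 hc1 h00 (by norm_num) (by norm_num)]
  · -- [a, b, c, d]
    obtain ⟨va, ha, ha0, ha1⟩ := get a (by simp)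
    obtain ⟨vb, hb, hb0, hb1⟩ := get b (by simp)
    obtain ⟨vc, hc, hc0, hc1⟩ := get c (by simp)
    obtain ⟨vd, hd, hd0, hd1⟩ := get d (by simp)
    simp [pvBodyA, pvBodyB, List.range_succ, ha, hb, hc, hd, hm, h00,
      pv_elem a rc va mi ha ha0 ha1 hm hm0 hm1,
      pv_elem b "00" vb 0 hb hb0 hb1 h00 (by norm_num) (by norm_num),
      pv_elem c "00" vc 0 hc hc0 hc1 h00 (by norm_num) (by norm_num),
      pv_elem d "00" vd 0 hd hd0 hd1 h00 (by norm_num) (by norm_num)]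
  · simp only [List.length_cons] at hlen; omega

-- ===== VERDICT (by name: the statement is the Claim_ definition above) =====
theorem round_constant_spec : Claim_equal_round_constant := by
  intro w round _ hpre
  unfold Pre_round_constant at hpre
  obtain ⟨⟨hlo, hhi⟩, hlen, hw⟩ := hpre
  unfold Spec_round_constant
  interval_cases round
  · exact pv_body "01" 1 w (by decide) (by decide) (by decide) hlen hw
  · exact pv_body "02" 2 w (by decide) (by decide) (by decide) hlen hw
  · exact pv_body "04" 4 w (by decide) (by decide) (by decide) hlen hw
  · exact pv_body "08" 8 w (by decide) (by decide) (by decide) hlen hw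
  · exact pv_body "10" 16 w (by decide) (by decide) (by decide) hlen hw
  · exact pv_body "20" 32 w (by decide) (by decide) (by decide) hlen hw
  · exact pv_body "40" 64 w (by decide) (by decide) (by decide) hlen hw
  · exact pv_body "80" 128 w (by decide) (by decide) (by decide) hlen hw
  · exact pv_body "1B" 27 w (by decide) (by decide) (by decide) hlen hw
  · exact pv_body "36" 54 w (by decide) (by decide) (by decide) hlen hw
  · exact pv_body "01" 1 w (by decide) (by decide) (by decide) hlen hw
  · exact pv_body "02" 2 w (by decide) (by decide) (by decide) hlen hw
  · exact pv_body "04" 4 w (by decide) (by decide) (by decide) hlen hw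
  · exact pv_body "08" 8 w (by decide) (by decide) (by decide) hlen hw
  · exact pv_body "10" 16 w (by decide) (by decide) (by decide) hlen hw
  · exact pv_body "20" 32 w (by decide) (by decide) (by decide) hlen hw
  · exact pv_body "40" 64 w (by decide) (by decide) (by decide) hlen hw
  · exact pv_body "80" 128 w (by decide) (by decide) (by decide) hlen hw
  · exact pv_body "1B" 27 w (by decide) (by decide) (by decide) hlen hw
  · exact pv_body "36" 54 w (by decide) (by decide) (by decide) hlen hw
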